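-- pv_equiv track=rewrite | github.com/tropancio/MI_Libreria | Mi_Libreria/Cruze.py | lista_Indice
-- ===== SOURCE A (Python) =====
-- def lista_Indice(lista_original):
--     lista_con_Indice = []
--     volatil = []
--     for elemento in lista_original:
--         volatil.append(elemento)
--         nuevo_indice = volatil.count(elemento)*100000 + elemento
--         lista_con_Indice.append(nuevo_indice)
--     return lista_con_Indice
-- ===== SOURCE B (Python) =====
-- def lista_Indice(lista_original):
--     # Group-then-scatter: one pass collects the index positions of each value;
--     # a second pass writes (occurrence_rank)*100000 + value back by original index.
--     groups = {}
--     for i, v in enumerate(lista_original):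
--         groups.setdefault(v, []).append(i)
--     result = [0] * len(lista_original)
--     for v, idxs in groups.items():
--         for j, i in enumerate(idxs):
--             result[i] = (j + 1) * 100000 + v
--     return result
-- ===== Notes on version B (the rewrite author's own statement) =====
-- stated objective: faster
-- what changed: B replaces A's incremental loop (which re-counts the current element in a growing copy of the prefix) by a two-phase group-then-scatter: first build a dict mapping each value to its list of positions, then write (rank+1)*100000+value into a pre-sized result at each stored position.
import Mathlib
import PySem

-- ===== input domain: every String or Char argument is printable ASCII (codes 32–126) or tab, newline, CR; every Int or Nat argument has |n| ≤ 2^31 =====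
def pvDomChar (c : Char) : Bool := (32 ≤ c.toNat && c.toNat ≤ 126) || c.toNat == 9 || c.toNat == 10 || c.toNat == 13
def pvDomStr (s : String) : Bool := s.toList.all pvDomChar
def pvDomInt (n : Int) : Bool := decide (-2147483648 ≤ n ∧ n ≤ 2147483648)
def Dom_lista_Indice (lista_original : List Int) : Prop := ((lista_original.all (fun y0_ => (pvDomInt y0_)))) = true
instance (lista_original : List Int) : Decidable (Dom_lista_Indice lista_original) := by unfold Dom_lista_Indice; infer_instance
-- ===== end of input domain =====

-- B replaces A's incremental loop (count of the element in a growing copy of the prefix) by a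
-- two-phase group-then-scatter: collect each value's positions in a dict, then write
-- (rank+1)*100000+value into a pre-sized result at each stored position.

-- ===== PORT A =====
-- A: keeps a growing copy `volatil` of the prefix and counts the current element in it.
def lista_Indice (lista_original : List Int) : List Int :=
  (lista_original.foldl
    (fun (st : List Int × List Int) elemento =>
      let volatil := st.2 ++ [elemento]
      let nuevo_indice := (volatil.count elemento : Int) * 100000 + elemento
      (st.1 ++ [nuevo_indice], volatil))
    ([], [])).1

-- ===== PORT B =====
-- B: groups = {value: [positions]} built in one pass; then scatter writes into a pre-sized result.
def lista_Indice_alt (lista_original : List Int) : List Int :=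
  let groups : PySem.Dict Int (List Int) :=
    (PySem.List.enumerate lista_original).foldl
      (fun d p => d.modify p.2 [] (fun xs => xs ++ [p.1])) PySem.Dict.empty
  let result := List.replicate lista_original.length (0 : Int)
  groups.items.foldl
    (fun res g =>
      (PySem.List.enumerate g.2).foldl
        (fun r q => PySem.List.pySetD r q.2 ((q.1 + 1) * 100000 + g.1)) res)
    result

-- ===== PRECONDITION & SPEC =====
def Spec_lista_Indice (lista_original : List Int) (out : List Int) : Prop := out = lista_Indice_alt lista_original
instance (lista_original : List Int) (out : List Int) : Decidable (Spec_lista_Indice lista_original out) := by unfold Spec_lista_Indice; infer_instance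

-- ===== CLAIM (what is proved, stated in full; the proofs are below) =====
def Claim_equal_lista_Indice : Prop := ∀ (lista_original : List Int), Dom_lista_Indice lista_original → Spec_lista_Indice lista_original (lista_Indice lista_original)

-- ===== LEMMAS AND PROOFS =====

-- A's loop as a structural recursion.
def pvFA (pre : List Int) : List Int → List Int
  | [] => []
  | x :: t => (((pre ++ [x]).count x : Int) * 100000 + x) :: pvFA (pre ++ [x]) t

theorem pvFA_fold (l : List Int) : ∀ (pre out : List Int),
    (l.foldl
      (fun (st : List Int × List Int) elemento =>
        let volatil := st.2 ++ [elemento]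
        let nuevo_indice := (volatil.count elemento : Int) * 100000 + elemento
        (st.1 ++ [nuevo_indice], volatil))
      (out, pre)).1 = out ++ pvFA pre l := by
  induction l with
  | nil => intro pre out; simp [pvFA]
  | cons x t ih =>
      intro pre out
      have h := ih (pre ++ [x]) (out ++ [((pre ++ [x]).count x : Int) * 100000 + x])
      simp only [List.foldl_cons]
      exact h.trans (by simp [pvFA])

theorem pvFA_length (l : List Int) : ∀ pre, (pvFA pre l).length = l.length := by
  induction l with
  | nil => intro pre; rfl
  | cons x t ih => intro pre; simp [pvFA, ih]

theorem pvFA_get (l : List Int) : ∀ (pre : List Int) (i : Nat) (h : i < l.length),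
    (pvFA pre l)[i]? = some ((((pre ++ l.take (i + 1)).count l[i] : Nat) : Int) * 100000 + l[i]) := by
  induction l with
  | nil => intro pre i h; simp at h
  | cons x t ih =>
      intro pre i h
      cases i with
      | zero => simp [pvFA]
      | succ k =>
          simp only [pvFA, List.getElem?_cons_succ, List.getElem_cons_succ]
          rw [ih (pre ++ [x]) k (by simpa using h)]
          simp [List.append_assoc]

-- positions of v in l, offset s (what B's dict stores at key v)
def pvPos (s : Int) (l : List Int) (v : Int) : List Int :=
  ((PySem.List.enumerate l s).filter (fun p => p.2 == v)).map (fun p => p.1)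

theorem pvPos_cons (s x v : Int) (t : List Int) :
    pvPos s (x :: t) v = (if x = v then [s] else []) ++ pvPos (s + 1) t v := by
  simp [pvPos, PySem.List.enumerate_cons, List.filter_cons]
  split_ifs with h
  · simp
  · simp

theorem mem_pvPos (s : Int) (l : List Int) (v x : Int) :
    x ∈ pvPos s l v ↔ ∃ (k : Nat) (_ : k < l.length), x = s + k ∧ l[k] = v := by
  simp only [pvPos, List.mem_map, List.mem_filter]
  constructor
  · rintro ⟨p, ⟨hp, hv⟩, rfl⟩
    obtain ⟨k, hk, rfl⟩ := (PySem.List.mem_enumerate_iff l s p).1 hp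
    exact ⟨k, hk, rfl, by simpa using hv⟩
  · rintro ⟨k, hk, rfl, hv⟩
    exact ⟨(s + k, l[k]), ⟨(PySem.List.mem_enumerate_iff l s _).2 ⟨k, hk, rfl⟩, by simp [hv]⟩, rfl⟩

theorem pairwise_pvPos (s : Int) (l : List Int) (v : Int) :
    (pvPos s l v).Pairwise (· < ·) := by
  exact ((PySem.List.pairwise_lt_enumerate l s).filter _).map _ (fun a b h => h)

theorem nodup_pvPos (s : Int) (l : List Int) (v : Int) : (pvPos s l v).Nodup :=
  (pairwise_pvPos s l v).imp (fun h => ne_of_lt h)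

theorem pvPos_getElem (l : List Int) : ∀ (i : Nat) (h : i < l.length) (s : Int),
    (pvPos s l l[i])[(l.take i).count l[i]]? = some (s + i) := by
  induction l with
  | nil => intro i h; simp at h
  | cons x t ih =>
      intro i h s
      cases i with
      | zero => simp [pvPos_cons]
      | succ k =>
          have hk : k < t.length := by simpa using h
          simp only [List.getElem_cons_succ, List.take_succ_cons, pvPos_cons]
          by_cases hx : x = t[k]
          · have hc : (x :: List.take k t).count t[k] = (List.take k t).count t[k] + 1 := by
              simp [hx]
            rw [if_pos hx, List.singleton_append, hc, List.getElem?_cons_succ, ih k hk (s + 1)]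
            congr 1
            push_cast
            ring
          · have hne : t[k] ≠ x := fun hcc => hx hcc.symm
            have hc : List.count t[k] (x :: List.take k t) = List.count t[k] (List.take k t) := by
              rw [List.count_cons]; simp [hx]
            rw [if_neg hx, List.nil_append, hc, ih k hk (s + 1)]
            congr 1
            push_cast
            ring

-- every stored position is ≥ s
theorem pvPos_nonneg (s : Int) (l : List Int) (v x : Int) (hx : x ∈ pvPos s l v) : s ≤ x := by
  obtain ⟨k, hk, rfl, -⟩ := (mem_pvPos s l v x).1 hx
  omega

-- the dict B builds
def pvGroups (l : List Int) : PySem.Dict Int (List Int) :=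
  (PySem.List.enumerate l).foldl
    (fun d p => d.modify p.2 [] (fun xs => xs ++ [p.1])) PySem.Dict.empty

theorem pvGroups_getD (l : List Int) (v : Int) : (pvGroups l).getD v [] = pvPos 0 l v := by
  have h : pvGroups l
      = ((PySem.List.enumerate l 0).map (fun p => (p.2, p.1))).foldl
          (fun d p => d.modify p.1 [] (fun xs => xs ++ [p.2])) PySem.Dict.empty := by
    rw [List.foldl_map]; rfl
  rw [h, PySem.Dict.getD_foldl_modify_append]
  simp [pvPos, List.filter_map, Function.comp_def]

theorem pvGroups_keys (l : List Int) : (pvGroups l).keys = PySem.Set.ofList l := by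
  unfold pvGroups
  rw [PySem.Dict.keys_foldl_modify_key (PySem.List.enumerate l 0) (fun p => p.2) []
    (fun _ p xs => xs ++ [p.1]) PySem.Dict.empty]
  rw [PySem.Dict.keys_empty, PySem.List.map_snd_enumerate, PySem.Set.update_nil_left]

theorem pvGroups_nodup_keys (l : List Int) : (pvGroups l).keys.Nodup := by
  unfold pvGroups
  exact PySem.Dict.nodup_keys_foldl_modify_key (PySem.List.enumerate l 0)
    (fun p => p.2) [] (fun _ p xs => xs ++ [p.1]) PySem.Dict.empty PySem.Dict.nodup_keys_empty

theorem pvGroups_items (l : List Int) :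
    (pvGroups l).items = (PySem.Set.ofList l).map (fun v => (v, pvPos 0 l v)) := by
  rw [PySem.Dict.items_eq_map_keys (pvGroups l) (pvGroups_nodup_keys l) [], pvGroups_keys]
  exact List.map_congr_left (fun v _ => by rw [pvGroups_getD])

-- the flat list of (position, value) writes B performs
def pvWrites (l : List Int) : List (Int × Int) :=
  (PySem.Set.ofList l).flatMap
    (fun v => (PySem.List.enumerate (pvPos 0 l v)).map (fun q => (q.2, (q.1 + 1) * 100000 + v)))

def pvSetAll (res : List Int) (ws : List (Int × Int)) : List Int :=
  ws.foldl (fun r w => PySem.List.pySetD r w.1 w.2) res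

theorem pvFoldlFlatMap {α β γ : Type} (xs : List α) (f : α → List β) (g : γ → β → γ) :
    ∀ (init : γ), (xs.flatMap f).foldl g init = xs.foldl (fun acc x => (f x).foldl g acc) init := by
  induction xs with
  | nil => intro init; rfl
  | cons x t ih => intro init; simp [List.foldl_append, ih]

theorem pvSetAll_length (ws : List (Int × Int)) : ∀ res, (pvSetAll res ws).length = res.length := by
  induction ws with
  | nil => intro res; rfl
  | cons w t ih => intro res; simp [pvSetAll, List.foldl_cons] at ih ⊢
                   rw [ih, PySem.List.length_pySetD]

theorem pvSetAll_get_not_mem (ws : List (Int × Int)) : ∀ (res : List Int) (i : Nat),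
    (∀ w ∈ ws, 0 ≤ w.1) → (∀ w ∈ ws, w.1 ≠ (i : Int)) →
    (pvSetAll res ws)[i]? = res[i]? := by
  induction ws with
  | nil => intro res i _ _; rfl
  | cons w t ih =>
      intro res i hnn hne
      have h0 : (0:Int) ≤ w.1 := hnn w (List.mem_cons_self)
      have : pvSetAll res (w :: t) = pvSetAll (res.set w.1.toNat w.2) t := by
        simp [pvSetAll, PySem.List.pySetD_of_nonneg _ _ h0]
      rw [this, ih _ i (fun x hx => hnn x (List.mem_cons_of_mem _ hx))
        (fun x hx => hne x (List.mem_cons_of_mem _ hx))]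
      exact List.getElem?_set_ne (by
        have := hne w (List.mem_cons_self); omega)

theorem pvSetAll_get_of_mem (ws : List (Int × Int)) : ∀ (res : List Int) (i : Nat) (x : Int),
    (ws.map (fun w => w.1)).Nodup → (∀ w ∈ ws, 0 ≤ w.1) →
    ((i : Int), x) ∈ ws → i < res.length →
    (pvSetAll res ws)[i]? = some x := by
  induction ws with
  | nil => intro _ _ _ _ _ hmem _; simp at hmem
  | cons w t ih =>
      intro res i x hnd hnn hmem hlen
      have h0 : (0:Int) ≤ w.1 := hnn w (List.mem_cons_self)
      have hstep : pvSetAll res (w :: t) = pvSetAll (res.set w.1.toNat w.2) t := by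
        simp [pvSetAll, PySem.List.pySetD_of_nonneg _ _ h0]
      rcases List.mem_cons.1 hmem with heq | hmem'
      · subst heq
        rw [List.map_cons] at hnd
        have hnot : ((i : Int)) ∉ t.map (fun w => w.1) := (List.nodup_cons.1 hnd).1
        rw [hstep, pvSetAll_get_not_mem t _ i (fun y hy => hnn y (List.mem_cons_of_mem _ hy))
          (fun y hy hyi => hnot (hyi ▸ List.mem_map_of_mem (f := fun w => w.1) hy))]
        simp [hlen]
      · rw [List.map_cons] at hnd
        rw [hstep]
        exact ih _ i x (List.nodup_cons.1 hnd).2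
          (fun y hy => hnn y (List.mem_cons_of_mem _ hy)) hmem' (by simpa using hlen)

theorem pvWrites_nonneg (l : List Int) : ∀ w ∈ pvWrites l, 0 ≤ w.1 := by
  intro w hw
  simp only [pvWrites, List.mem_flatMap, List.mem_map] at hw
  obtain ⟨v, -, q, hq, rfl⟩ := hw
  have : q ∈ PySem.List.enumerate (pvPos 0 l v) 0 := hq
  have hmem : q.2 ∈ pvPos 0 l v := by
    obtain ⟨k, hk, rfl⟩ := (PySem.List.mem_enumerate_iff _ 0 q).1 this
    simpa using List.getElem_mem hk
  exact pvPos_nonneg 0 l v q.2 hmem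

theorem pvWrites_map_fst (l : List Int) :
    (pvWrites l).map (fun w => w.1) = (PySem.Set.ofList l).flatMap (fun v => pvPos 0 l v) := by
  simp only [pvWrites, List.map_flatMap, List.map_map]
  refine List.flatMap_congr (fun v _ => ?_)
  have : ((fun w : Int × Int => w.1) ∘ fun q : Int × Int => (q.2, (q.1 + 1) * 100000 + v))
      = fun q : Int × Int => q.2 := rfl
  rw [this, PySem.List.map_snd_enumerate]

theorem pvWrites_nodup_fst (l : List Int) : ((pvWrites l).map (fun w => w.1)).Nodup := by
  rw [pvWrites_map_fst]
  rw [List.nodup_flatMap]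
  refine ⟨fun v _ => nodup_pvPos 0 l v, ?_⟩
  have hnd := PySem.Set.nodup_ofList l
  refine List.Pairwise.imp_of_mem ?_ (hnd.imp (fun h => h))
  intro v w _ _ hvw
  intro x hxv hxw
  obtain ⟨k, hk, rfl, hv⟩ := (mem_pvPos 0 l v x).1 hxv
  obtain ⟨k', hk', he, hw⟩ := (mem_pvPos 0 l w _).1 hxw
  have hkk : k' = k := by omega
  subst hkk
  exact hvw (by rw [← hv, ← hw])

theorem pvAlt_eq_setAll (l : List Int) :
    lista_Indice_alt l = pvSetAll (List.replicate l.length 0) (pvWrites l) := by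
  show ((pvGroups l).items.foldl _ _) = _
  rw [pvGroups_items, List.foldl_map]
  unfold pvWrites pvSetAll
  rw [pvFoldlFlatMap]
  congr 1
  funext acc v
  rw [List.foldl_map]

theorem pvAlt_get (l : List Int) (i : Nat) (h : i < l.length) :
    (lista_Indice_alt l)[i]? = some (((((l.take i).count l[i] : Nat) : Int) + 1) * 100000 + l[i]) := by
  rw [pvAlt_eq_setAll]
  refine pvSetAll_get_of_mem _ _ i _ (pvWrites_nodup_fst l) (pvWrites_nonneg l) ?_ (by simpa using h)
  simp only [pvWrites, List.mem_flatMap, List.mem_map]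
  refine ⟨l[i], (PySem.Set.mem_ofList l _).2 (List.getElem_mem h), (((l.take i).count l[i] : Int), (i : Int)), ?_, rfl⟩
  have hpos := pvPos_getElem l i h 0
  have henum : (PySem.List.enumerate (pvPos 0 l l[i]) 0)[(l.take i).count l[i]]? =
      some ((((l.take i).count l[i] : Nat) : Int), ((0 : Int) + i)) := by
    rw [PySem.List.getElem?_enumerate, hpos]
    simp
  have := List.mem_of_getElem? henum
  simpa using this

-- ===== VERDICT (by name: the statement is the Claim_ definition above) =====
theorem lista_Indice_spec : Claim_equal_lista_Indice := by
  intro l _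
  show lista_Indice l = lista_Indice_alt l
  have hA : lista_Indice l = pvFA [] l := by
    unfold lista_Indice
    have := pvFA_fold l [] []
    simpa using this
  have hlenB : (lista_Indice_alt l).length = l.length := by
    rw [pvAlt_eq_setAll, pvSetAll_length, List.length_replicate]
  apply List.ext_getElem?
  intro i
  by_cases h : i < l.length
  · rw [hA, pvFA_get l [] i (by simpa using h), pvAlt_get l i h]
    have ht : l.take (i + 1) = l.take i ++ [l[i]] := by
      rw [List.take_add_one]
      simp [List.getElem?_eq_getElem h]
    rw [List.nil_append, ht, List.count_append]
    simp
  · rw [List.getElem?_eq_none (by rw [hA, pvFA_length]; omega),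
        List.getElem?_eq_none (by rw [hlenB]; omega)]
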